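-- pv_equiv track=rewrite | github.com/jabrown93/CrossWatch | providers/sync/jellyfin/_common.py | guid_priority_from_cfg
-- ===== SOURCE A (Python) =====
-- from typing import Any, Mapping, Iterable
--
-- def guid_priority_from_cfg(cfg_list: Iterable[str] | None) -> list[str]:
--     default = ["tmdb", "imdb", "tvdb", "agent:themoviedb:en", "agent:themoviedb", "agent:imdb"]
--     if not cfg_list:
--         return default
--     seen: set[str] = set()
--     out: list[str] = []
--     for k in cfg_list:
--         k = str(k).strip()
--         if k and k not in seen:
--             out.append(k)
--             seen.add(k)
--     for k in default:
--         if k not in seen: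
--             out.append(k)
--     return out
-- ===== SOURCE B (Python) =====
-- def _dedup(xs):
--     # filter-based dedup: repeatedly take the head and drop all its later duplicates
--     out = []
--     while xs:
--         head = xs[0]
--         out.append(head)
--         xs = [x for x in xs[1:] if x != head]
--     return out
--
-- def guid_priority_from_cfg(cfg_list):
--     default = ["tmdb", "imdb", "tvdb", "agent:themoviedb:en", "agent:themoviedb", "agent:imdb"]
--     if not cfg_list:
--         return default
--     cleaned = [s for k in cfg_list if (s := str(k).strip())]
--     return _dedup(cleaned + default)
-- ===== Notes on version B (the rewrite author's own statement) =====
-- stated objective: alternative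
-- what changed: Replaces A's seen-set threaded through two separate append loops by a keep-head/filter-out-its-duplicates dedup loop over cleaned items ++ defaults: no auxiliary set or membership structure is maintained, duplicates are removed by filtering the remaining suffix at each step (quadratic worst case, so slower on large inputs).
import Mathlib
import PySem

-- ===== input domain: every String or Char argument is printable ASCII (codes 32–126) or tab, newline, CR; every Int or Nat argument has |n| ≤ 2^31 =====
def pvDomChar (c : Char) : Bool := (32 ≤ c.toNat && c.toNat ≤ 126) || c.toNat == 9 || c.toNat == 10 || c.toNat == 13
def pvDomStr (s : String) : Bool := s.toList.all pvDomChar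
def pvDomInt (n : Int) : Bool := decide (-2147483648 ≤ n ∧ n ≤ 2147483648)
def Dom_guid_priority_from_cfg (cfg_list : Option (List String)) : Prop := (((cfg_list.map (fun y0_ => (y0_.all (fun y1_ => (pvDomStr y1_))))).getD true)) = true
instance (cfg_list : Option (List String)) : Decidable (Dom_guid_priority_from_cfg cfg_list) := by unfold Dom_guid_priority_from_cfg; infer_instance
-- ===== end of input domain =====

-- B is an alternative decomposition: a keep-head/filter-out-its-duplicates dedup loop over cleaned items ++ defaults, with no seen-set maintained (O(n^2) worst case, slower than A on large distinct-heavy inputs).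

-- ===== PORT A =====
def guidDefault : List String := ["tmdb", "imdb", "tvdb", "agent:themoviedb:en", "agent:themoviedb", "agent:imdb"]

-- literal port of A: fold threading (seen, out); then a second fold over default appending unseen keys
def guid_priority_from_cfg (cfg_list : Option (List String)) : List String :=
  match cfg_list with
  | none => guidDefault
  | some cfg =>
    if cfg = [] then guidDefault
    else
      let st := cfg.foldl (fun (p : PySem.Set String × List String) k =>
          let k := PySem.Str.strip k
          if k ≠ "" ∧ ¬ (PySem.Set.contains p.1 k = true) then
            (PySem.Set.add p.1 k, p.2 ++ [k])
          else p)
        (PySem.Set.empty, [])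
      (guidDefault.foldl (fun (p : PySem.Set String × List String) k =>
          if ¬ (PySem.Set.contains p.1 k = true) then (p.1, p.2 ++ [k]) else p) st).2

-- ===== PORT B =====
-- port of Source B's _dedup while loop: state (xs, out); take the head, filter its duplicates out of the tail
def dedupF : List String → List String → List String
  | [], out => out
  | x :: rest, out => dedupF (rest.filter (fun y => y ≠ x)) (out ++ [x])
termination_by xs _ => xs.length
decreasing_by
  simpa using Nat.lt_succ_of_le (le_trans (List.length_filter_le _ _) (by simp))

def guid_priority_from_cfg_alt (cfg_list : Option (List String)) : List String :=
  match cfg_list with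
  | none => guidDefault
  | some cfg =>
    if cfg = [] then guidDefault
    else
      let cleaned := cfg.filterMap (fun k =>
        let s := PySem.Str.strip k
        if s = "" then none else some s)
      dedupF (cleaned ++ guidDefault) []

-- ===== PRECONDITION & SPEC =====
def Spec_guid_priority_from_cfg (cfg_list : Option (List String)) (out : List String) : Prop := out = guid_priority_from_cfg_alt cfg_list
instance (cfg_list : Option (List String)) (out : List String) : Decidable (Spec_guid_priority_from_cfg cfg_list out) := by unfold Spec_guid_priority_from_cfg; infer_instance

-- ===== CLAIM =====
def Claim_equal_guid_priority_from_cfg : Prop := ∀ (cfg_list : Option (List String)), Dom_guid_priority_from_cfg cfg_list → Spec_guid_priority_from_cfg cfg_list (guid_priority_from_cfg cfg_list)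

-- ===== LEMMAS AND PROOFS =====

-- A's first loop keeps seen = out (as lists) and is exactly Set.add over the stripped nonempty items.
theorem firstLoop_eq (cfg : List String) (s : List String) :
    cfg.foldl (fun (p : PySem.Set String × List String) k =>
        let k := PySem.Str.strip k
        if k ≠ "" ∧ ¬ (PySem.Set.contains p.1 k = true) then
          (PySem.Set.add p.1 k, p.2 ++ [k])
        else p) (s, s)
    = (let t := (cfg.filterMap (fun k =>
        let s := PySem.Str.strip k
        if s = "" then none else some s)).foldl PySem.Set.add s
       (t, t)) := by
  induction cfg generalizing s with
  | nil => simp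
  | cons k rest ih =>
    by_cases h0 : PySem.Str.strip k = ""
    · simpa [h0] using ih s
    · by_cases hc : PySem.Str.strip k ∈ s
      · have hadd : PySem.Set.add s (PySem.Str.strip k) = s := by
          simp [PySem.Set.add, hc]
        simpa [h0, hc, hadd] using ih s
      · have hadd : PySem.Set.add s (PySem.Str.strip k) = s ++ [PySem.Str.strip k] := by
          simp [PySem.Set.add, hc]
        simpa [h0, hc, hadd] using ih (s ++ [PySem.Str.strip k])

-- A's second loop never touches seen: it appends the keys of l not in the fixed set s.
theorem secondLoop_eq (l : List String) (s o : List String) :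
    (l.foldl (fun (p : PySem.Set String × List String) k =>
        if ¬ (PySem.Set.contains p.1 k = true) then (p.1, p.2 ++ [k]) else p) (s, o)).2
    = o ++ l.filter (fun k => !(PySem.Set.contains s k)) := by
  induction l generalizing o with
  | nil => simp
  | cons k rest ih =>
    by_cases hc : k ∈ s
    · simpa [List.filter_cons, hc] using ih o
    · simpa [List.filter_cons, hc] using ih (o ++ [k])

-- folding Set.add over a nodup list appends exactly its unseen elements.
theorem foldl_add_nodup (l : List String) (s : List String) (hnd : l.Nodup) :
    l.foldl PySem.Set.add s = s ++ l.filter (fun k => !(PySem.Set.contains s k)) := by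
  induction l generalizing s with
  | nil => simp
  | cons k rest ih =>
    have hk : k ∉ rest := (List.nodup_cons.mp hnd).1
    have hrest : rest.Nodup := (List.nodup_cons.mp hnd).2
    by_cases hc : k ∈ s
    · have hadd : PySem.Set.add s k = s := by simp [PySem.Set.add, hc]
      simpa [List.filter_cons, hc, hadd] using ih s hrest
    · have hadd : PySem.Set.add s k = s ++ [k] := by simp [PySem.Set.add, hc]
      have hfil : rest.filter (fun x => !(PySem.Set.contains (s ++ [k]) x))
          = rest.filter (fun x => !(PySem.Set.contains s x)) := by
        apply List.filter_congr
        intro x hx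
        have hxk : x ≠ k := fun h => hk (h ▸ hx)
        simp [PySem.Set.contains, hxk]
      rw [List.foldl_cons, hadd, ih (s ++ [k]) hrest, hfil]
      simp [hc]

theorem guidDefault_nodup : guidDefault.Nodup := by decide

-- the accumulator of dedupF only collects at the front
theorem dedupF_acc_aux (n : Nat) : ∀ (xs : List String), xs.length ≤ n → ∀ (acc : List String), dedupF xs acc = acc ++ dedupF xs [] := by
  induction n with
  | zero =>
    intro xs hn acc
    have : xs = [] := List.eq_nil_of_length_eq_zero (Nat.le_zero.mp hn)
    simp [this, dedupF]
  | succ m ih =>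
    intro xs hn acc
    match xs with
    | [] => simp [dedupF]
    | x :: rest =>
      have hlen : (rest.filter (fun y => y ≠ x)).length ≤ m := by
        have := List.length_filter_le (fun y => decide (y ≠ x)) rest
        simp at hn
        omega
      rw [dedupF, dedupF, ih _ hlen (acc ++ [x]), ih _ hlen ([] ++ [x])]
      simp

theorem dedupF_acc (xs : List String) (acc : List String) :
    dedupF xs acc = acc ++ dedupF xs [] :=
  dedupF_acc_aux xs.length xs le_rfl acc

-- the seen-set fold dedup equals B's filter-loop dedup (generalized invariant)
theorem foldl_add_eq_dedupF (xs : List String) (s : List String) :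
    xs.foldl PySem.Set.add s = s ++ dedupF (xs.filter (fun x => !(PySem.Set.contains s x))) [] := by
  induction xs generalizing s with
  | nil => simp [dedupF]
  | cons k rest ih =>
    by_cases hc : k ∈ s
    · have hadd : PySem.Set.add s k = s := by simp [PySem.Set.add, hc]
      simpa [List.filter_cons, hc, hadd, PySem.Set.contains] using ih s
    · have hadd : PySem.Set.add s k = s ++ [k] := by simp [PySem.Set.add, hc]
      have hfil : rest.filter (fun x => !(PySem.Set.contains (s ++ [k]) x))
          = (rest.filter (fun x => !(PySem.Set.contains s x))).filter (fun y => y ≠ k) := by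
        rw [List.filter_filter]
        apply List.filter_congr
        intro x _
        by_cases hxk : x = k <;> simp [PySem.Set.contains, hxk]
      rw [List.foldl_cons, hadd, ih (s ++ [k]), hfil]
      simp [PySem.Set.contains, hc]
      conv_rhs => rw [dedupF]
      simp only [List.filter_filter, decide_not, List.nil_append]
      rw [dedupF_acc _ [k]]
      simp

theorem dedupF_eq_foldl (xs : List String) :
    dedupF xs [] = xs.foldl PySem.Set.add ([] : List String) := by
  have h := foldl_add_eq_dedupF xs []
  simp [PySem.Set.contains] at h
  simpa using h.symm

-- ===== VERDICT =====
theorem guid_priority_from_cfg_spec : Claim_equal_guid_priority_from_cfg := by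
  intro cfg_list _
  unfold Spec_guid_priority_from_cfg guid_priority_from_cfg guid_priority_from_cfg_alt
  match cfg_list with
  | none => rfl
  | some cfg =>
    by_cases hnil : cfg = []
    · simp [hnil]
    · simp only [hnil, ite_false]
      rw [show (PySem.Set.empty : PySem.Set String) = ([] : List String) from rfl]
      rw [firstLoop_eq cfg []]
      set items := cfg.filterMap (fun k =>
        let s := PySem.Str.strip k
        if s = "" then none else some s) with hitems
      simp only
      rw [secondLoop_eq]
      rw [dedupF_eq_foldl, List.foldl_append]
      rw [show (List.foldl PySem.Set.add [] items : List String) = items.foldl PySem.Set.add [] from rfl]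
      rw [foldl_add_nodup guidDefault _ guidDefault_nodup]
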